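-- pv_equiv track=rewrite | github.com/Nicoklei/test | cell_integration/production_database_scripts-master/strips/modules/getDaqConfig.py | find_parent_sn
-- ===== SOURCE A (Python) =====
-- def find_parent_sn(component_json):
--     '''
--     Find parent SN of component
--     '''
--
--     sn = None
--     if ('parents' not in component_json or component_json['parents'] is None):
--         return None
--     else:
--         plist = component_json['parents']
--         for pi in plist:
--             # No component in parent slot or Parent component has no serialNumber
--             if (pi['component'] is None or 'serialNumber' not in pi['component']):
--                 continue
--             sn = pi['component']['serialNumber']
--
--     return sn
-- ===== SOURCE B (Python) =====
-- def find_parent_sn(component_json):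
--     '''
--     Find parent SN of component: reverse scan, early return on first valid parent.
--     '''
--     if 'parents' not in component_json or component_json['parents'] is None:
--         return None
--     for pi in reversed(component_json['parents']):
--         comp = pi.get('component')
--         if comp is not None and 'serialNumber' in comp:
--             return comp['serialNumber']
--     return None
-- ===== Notes on version B (the rewrite author's own statement) =====
-- stated objective: idiomatic
-- what changed: B scans the parents list in reverse and returns immediately at the first parent carrying a serialNumber, instead of A's forward pass that keeps overwriting an accumulator; B uses pi.get('component') so it returns a value where A raises KeyError on a parent entry without a 'component' key.
-- crash fix: On inputs whose 'parents' list contains an entry without a 'component' key A raises KeyError; B skips such entries and returns the serialNumber of the last valid parent (or None). — e.g. on find_parent_sn([("parents", [[("component", [("serialNumber", "SN0")])], []])]): A raises KeyError, B returns some "SN0"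
import Mathlib
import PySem

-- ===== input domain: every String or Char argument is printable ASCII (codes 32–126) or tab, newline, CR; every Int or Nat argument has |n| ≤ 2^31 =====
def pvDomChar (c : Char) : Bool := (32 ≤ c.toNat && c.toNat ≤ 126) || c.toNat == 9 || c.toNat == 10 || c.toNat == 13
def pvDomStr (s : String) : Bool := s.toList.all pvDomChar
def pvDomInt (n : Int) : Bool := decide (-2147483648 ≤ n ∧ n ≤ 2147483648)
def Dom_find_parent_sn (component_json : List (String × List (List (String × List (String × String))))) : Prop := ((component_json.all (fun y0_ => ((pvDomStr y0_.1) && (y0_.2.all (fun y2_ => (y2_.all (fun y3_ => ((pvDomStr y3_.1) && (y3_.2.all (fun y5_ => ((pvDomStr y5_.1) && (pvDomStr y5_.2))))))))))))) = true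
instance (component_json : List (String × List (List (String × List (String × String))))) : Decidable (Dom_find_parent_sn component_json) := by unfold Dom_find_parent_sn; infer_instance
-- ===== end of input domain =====

-- B reverses the traversal with early return (idiomatic) instead of A's forward last-write-wins pass;
-- equivalence of return values is proved on Pre_ (inputs where A does not raise KeyError).


-- ===== PORT A =====
-- dict lookup = first match in the association list (Python dict semantics)
def pvLookup {α : Type} (d : List (String × α)) (k : String) : Option α :=
  match d with
  | [] => none
  | (k', v) :: rest => if k' == k then some v else pvLookup rest k

-- A: sn starts at None; forward loop over plist; each parent whose component has a
-- serialNumber overwrites sn.  The 'is None' checks of the Python cannot fire under the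
-- declared type (values are lists, never None), so only key presence is tested.
def find_parent_sn (component_json : List (String × List (List (String × List (String × String))))) : Option String :=
  match pvLookup component_json "parents" with
  | none => none
  | some plist =>
    plist.foldl (fun sn pi =>
      match pvLookup pi "component" with
      | none => sn          -- Python raises KeyError here; excluded by Pre_find_parent_sn
      | some comp =>
        match pvLookup comp "serialNumber" with
        | none => sn        -- 'serialNumber' not in pi['component'] → continue
        | some v => some v) none

-- ===== PORT B =====
-- B's loop: walk the reversed parents list, return at the first valid parent.
def findParentSnRev (l : List (List (String × List (String × String)))) : Option String :=
  match l with
  | [] => none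
  | pi :: rest =>
    match pvLookup pi "component" with
    | none => findParentSnRev rest          -- pi.get('component') is None → skip
    | some comp =>
      match pvLookup comp "serialNumber" with
      | none => findParentSnRev rest
      | some v => some v

def find_parent_sn_alt (component_json : List (String × List (List (String × List (String × String))))) : Option String :=
  match pvLookup component_json "parents" with
  | none => none
  | some plist => findParentSnRev plist.reverse

-- ===== PRECONDITION & SPEC =====
-- Pre_ excludes exactly the inputs on which Python A raises KeyError: a parents entry
-- without a 'component' key (missing 'parents' key → the guard returns None, no raise).
def Pre_find_parent_sn (component_json : List (String × List (List (String × List (String × String))))) : Prop :=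
  (((component_json.lookup "parents").getD []).all
    (fun pi => (pi.lookup "component").isSome)) = true
instance (component_json : List (String × List (List (String × List (String × String))))) : Decidable (Pre_find_parent_sn component_json) := by unfold Pre_find_parent_sn; infer_instance

def pvWitness_find_parent_sn : (List (String × List (List (String × List (String × String))))) :=
  [("parents", [[("component", [("serialNumber", "SN1")])], [("component", [])]])]

-- A raises KeyError on parent entries without a 'component' key; B skips them and returns
-- the serialNumber of the last valid parent (or None).
def Raises_find_parent_sn (component_json : List (String × List (List (String × List (String × String))))) : Prop :=
  (((component_json.lookup "parents").getD []).all
    (fun pi => (pi.lookup "component").isSome)) = false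
instance (component_json : List (String × List (List (String × List (String × String))))) : Decidable (Raises_find_parent_sn component_json) := by unfold Raises_find_parent_sn; infer_instance
def pvRaiseWitness_find_parent_sn : (List (String × List (List (String × List (String × String))))) :=
  [("parents", [[("component", [("serialNumber", "SN0")])], []])]
def pvRaiseWitnessOut_find_parent_sn : Option String := some "SN0"

def Spec_find_parent_sn (component_json : List (String × List (List (String × List (String × String))))) (out : Option String) : Prop := out = find_parent_sn_alt component_json
instance (component_json : List (String × List (List (String × List (String × String))))) (out : Option String) : Decidable (Spec_find_parent_sn component_json out) := by unfold Spec_find_parent_sn; infer_instance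

-- ===== CLAIM (what is proved, stated in full; the proofs are below) =====
def Claim_equal_find_parent_sn : Prop := ∀ (component_json : List (String × List (List (String × List (String × String))))), Dom_find_parent_sn component_json → Pre_find_parent_sn component_json → Spec_find_parent_sn component_json (find_parent_sn component_json)
def Claim_raises_find_parent_sn : Prop := (∀ (component_json : List (String × List (List (String × List (String × String))))), Dom_find_parent_sn component_json → Raises_find_parent_sn component_json → ¬ Pre_find_parent_sn component_json) ∧ (Dom_find_parent_sn (pvRaiseWitness_find_parent_sn) ∧ Raises_find_parent_sn (pvRaiseWitness_find_parent_sn) ∧ find_parent_sn_alt (pvRaiseWitness_find_parent_sn) = pvRaiseWitnessOut_find_parent_sn)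

-- ===== LEMMAS AND PROOFS =====

-- the value one parent entry contributes (none = skipped)
def pstep (pi : List (String × List (String × String))) : Option String :=
  match pvLookup pi "component" with
  | none => none
  | some comp => pvLookup comp "serialNumber"

theorem findRev_cons (pi : List (String × List (String × String)))
    (rest : List (List (String × List (String × String)))) :
    findParentSnRev (pi :: rest) = (pstep pi).or (findParentSnRev rest) := by
  conv_lhs => rw [findParentSnRev]
  unfold pstep
  cases h : pvLookup pi "component" with
  | none => simp
  | some comp => cases h2 : pvLookup comp "serialNumber" <;> simp [h2]

theorem findRev_append_singleton (pi : List (String × List (String × String)))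
    (r : List (List (String × List (String × String)))) :
    findParentSnRev (r ++ [pi]) = (findParentSnRev r).or (pstep pi) := by
  induction r with
  | nil => simp [findRev_cons, findParentSnRev]
  | cons q t iht => simp [findRev_cons, iht, Option.or_assoc]

theorem foldl_eq_rev (l : List (List (String × List (String × String)))) (sn : Option String) :
    l.foldl (fun sn pi =>
      match pvLookup pi "component" with
      | none => sn
      | some comp =>
        match pvLookup comp "serialNumber" with
        | none => sn
        | some v => some v) sn
    = (findParentSnRev l.reverse).or sn := by
  induction l generalizing sn with
  | nil => simp [findParentSnRev]
  | cons pi rest ih =>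
    have hstep : (fun (sn : Option String) pi =>
        match pvLookup pi "component" with
        | none => sn
        | some comp =>
          match pvLookup comp "serialNumber" with
          | none => sn
          | some v => some v) sn pi = (pstep pi).or sn := by
      unfold pstep
      cases h : pvLookup pi "component" with
      | none => simp [h]
      | some comp => cases h2 : pvLookup comp "serialNumber" <;> simp [h, h2]
    simp only [List.foldl_cons, hstep, ih, List.reverse_cons,
      findRev_append_singleton, Option.or_assoc]

-- ===== VERDICT (by name: the statement is the Claim_ definition above) =====
theorem find_parent_sn_spec : Claim_equal_find_parent_sn := by
  intro cj _ _
  unfold Spec_find_parent_sn find_parent_sn find_parent_sn_alt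
  cases pvLookup cj "parents" with
  | none => rfl
  | some plist => simp [foldl_eq_rev]

theorem find_parent_sn_raises : Claim_raises_find_parent_sn := by
  unfold Claim_raises_find_parent_sn
  constructor
  · intro cj _ hr hp
    unfold Raises_find_parent_sn at hr
    unfold Pre_find_parent_sn at hp
    simp [hp] at hr
  · exact ⟨by decide, by decide, by decide⟩

-- self-check: the raise witness really lies in the raise region and B returns the stated value there
theorem pvRaiseWitness_ok : Raises_find_parent_sn pvRaiseWitness_find_parent_sn ∧ find_parent_sn_alt pvRaiseWitness_find_parent_sn = pvRaiseWitnessOut_find_parent_sn :=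
  ⟨find_parent_sn_raises.2.2.1, find_parent_sn_raises.2.2.2⟩
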